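-- pv_equiv track=rewrite | github.com/golamshaifullah/pleb | scripts/audit_system_flags.py | _join_distinct
-- ===== SOURCE A (Python) =====
-- from typing import Dict, Iterable, Optional
--
-- def _join_distinct(values: Iterable[object]) -> str:
--     uniq = []
--     seen = set()
--     for value in values:
--         text = str(value).strip()
--         if not text or text.lower() == "nan":
--             continue
--         if text in seen:
--             continue
--         seen.add(text)
--         uniq.append(text)
--     return ";".join(sorted(uniq))
-- ===== SOURCE B (Python) =====
-- def _join_distinct(values) -> str:
--     texts = []
--     for value in values:
--         text = str(value).strip()
--         if text and text.lower() != "nan":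
--             texts.append(text)
--     texts.sort()
--     out = []
--     prev = None
--     for text in texts:
--         if text != prev:
--             out.append(text)
--             prev = text
--     return ";".join(out)
-- ===== Notes on version B (the rewrite author's own statement) =====
-- stated objective: alternative
-- what changed: B drops the hash 'seen' set entirely: it collects all filtered values (duplicates included), sorts them, and deduplicates by a single adjacency scan over the sorted list before joining.
import Mathlib
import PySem

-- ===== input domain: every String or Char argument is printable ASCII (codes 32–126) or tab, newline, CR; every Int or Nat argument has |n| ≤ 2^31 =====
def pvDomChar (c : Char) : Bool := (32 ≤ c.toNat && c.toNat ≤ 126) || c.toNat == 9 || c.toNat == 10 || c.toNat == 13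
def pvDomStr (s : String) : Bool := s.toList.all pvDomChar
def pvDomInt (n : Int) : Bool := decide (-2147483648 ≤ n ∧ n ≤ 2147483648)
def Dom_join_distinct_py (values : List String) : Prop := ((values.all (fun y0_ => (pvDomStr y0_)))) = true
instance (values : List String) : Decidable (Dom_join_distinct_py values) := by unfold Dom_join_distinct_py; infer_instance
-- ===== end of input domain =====

set_option maxHeartbeats 2000000

-- B replaces A's hash 'seen' set by sort-then-adjacent-dedup; alternative decomposition, same cost.

-- ===== PORT A =====
-- loop body of A (literal: filter, 'seen' membership test, append to uniq and seen)
def pvStepA (st : List String × PySem.Set String) (value : String) : List String × PySem.Set String :=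
  if PySem.Str.strip value = "" ∨ PySem.Str.lower (PySem.Str.strip value) = "nan" then st
  else if st.2.contains (PySem.Str.strip value) then st
  else (st.1 ++ [PySem.Str.strip value], st.2.add (PySem.Str.strip value))

def join_distinct_py (values : List String) : String :=
  let st := values.foldl pvStepA ([], PySem.Set.empty)
  PySem.Str.join ";" (PySem.List.sorted st.1 (fun x => x) false)

-- ===== PORT B =====
-- B's first loop body: collect every filtered stripped text (duplicates kept)
def pvStepB (acc : List String) (value : String) : List String :=
  if PySem.Str.strip value ≠ "" ∧ PySem.Str.lower (PySem.Str.strip value) ≠ "nan" then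
    acc ++ [PySem.Str.strip value]
  else acc

-- B's second loop: append each element that differs from the previously kept one
def pyDedupLoop (ts : List String) (prev : Option String) (out : List String) : List String :=
  match ts with
  | [] => out
  | t :: rest =>
      if some t ≠ prev then pyDedupLoop rest (some t) (out ++ [t])
      else pyDedupLoop rest prev out

def join_distinct_py_alt (values : List String) : String :=
  let texts := values.foldl pvStepB []
  PySem.Str.join ";" (pyDedupLoop (PySem.List.sorted texts (fun x => x) false) none [])

-- ===== PRECONDITION & SPEC =====
def Spec_join_distinct_py (values : List String) (out : String) : Prop := out = join_distinct_py_alt values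
instance (values : List String) (out : String) : Decidable (Spec_join_distinct_py values out) := by unfold Spec_join_distinct_py; infer_instance

-- ===== CLAIM (what is proved, stated in full; the proofs are below) =====
def Claim_equal_join_distinct_py : Prop := ∀ (values : List String), Dom_join_distinct_py values → Spec_join_distinct_py values (join_distinct_py values)

-- ===== LEMMAS AND PROOFS =====

-- the filtered (still duplicated) list of stripped texts
def pvClean (values : List String) : List String :=
  match values with
  | [] => []
  | v :: rest =>
      if PySem.Str.strip v ≠ "" ∧ PySem.Str.lower (PySem.Str.strip v) ≠ "nan" then
        PySem.Str.strip v :: pvClean rest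
      else pvClean rest

-- structural form of B's dedup loop
def pvDedup (ts : List String) (prev : Option String) : List String :=
  match ts with
  | [] => []
  | t :: rest => if some t ≠ prev then t :: pvDedup rest (some t) else pvDedup rest prev

theorem pyDedupLoop_eq (ts : List String) (prev : Option String) (out : List String) :
    pyDedupLoop ts prev out = out ++ pvDedup ts prev := by
  induction ts generalizing prev out with
  | nil => simp [pyDedupLoop, pvDedup]
  | cons t rest ih =>
      simp only [pyDedupLoop, pvDedup]
      split_ifs with h
      · rw [ih]; simp
      · rw [ih]

theorem foldB_eq (values : List String) (acc : List String) :
    values.foldl pvStepB acc = acc ++ pvClean values := by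
  induction values generalizing acc with
  | nil => simp [pvClean]
  | cons v rest ih =>
      rw [List.foldl_cons, ih]
      by_cases h : PySem.Str.strip v ≠ "" ∧ PySem.Str.lower (PySem.Str.strip v) ≠ "nan"
      · rw [pvStepB, if_pos h, pvClean, if_pos h, List.append_assoc, List.singleton_append]
      · rw [pvStepB, if_neg h, pvClean, if_neg h]

theorem foldA_eq (values : List String) (u : PySem.Set String) :
    values.foldl pvStepA (u, u)
    = (PySem.Set.update u (pvClean values), PySem.Set.update u (pvClean values)) := by
  induction values generalizing u with
  | nil => simp [pvClean, PySem.Set.update]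
  | cons v rest ih =>
      rw [List.foldl_cons, pvClean]
      by_cases h : PySem.Str.strip v = "" ∨ PySem.Str.lower (PySem.Str.strip v) = "nan"
      · have hstep : pvStepA (u, u) v = (u, u) := by rw [pvStepA, if_pos h]
        rw [hstep, ih, if_neg (fun hcontra => h.elim hcontra.1 hcontra.2)]
      · rw [if_pos ⟨fun h1 => h (Or.inl h1), fun h2 => h (Or.inr h2)⟩]
        by_cases hc : PySem.Set.contains u (PySem.Str.strip v)
        · have hmem : PySem.Str.strip v ∈ u := List.mem_of_elem_eq_true hc
          have hstep : pvStepA (u, u) v = (u, u) := by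
            simp [pvStepA, h, hc, hmem]
          have hupd : PySem.Set.update u (PySem.Str.strip v :: pvClean rest)
              = PySem.Set.update (PySem.Set.add u (PySem.Str.strip v)) (pvClean rest) := rfl
          have hadd : PySem.Set.add u (PySem.Str.strip v) = u := by
            simp [PySem.Set.add, hc, hmem]
          rw [hstep, ih, hupd, hadd]
        · have hmem : PySem.Str.strip v ∉ u := fun hm => hc (List.elem_eq_true_of_mem hm)
          have hstep : pvStepA (u, u) v
              = (u ++ [PySem.Str.strip v], PySem.Set.add u (PySem.Str.strip v)) := by
            simp [pvStepA, h, hc, hmem]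
          have hadd : PySem.Set.add u (PySem.Str.strip v) = u ++ [PySem.Str.strip v] := by
            simp [PySem.Set.add, hc, hmem]
          have hupd : PySem.Set.update u (PySem.Str.strip v :: pvClean rest)
              = PySem.Set.update (PySem.Set.add u (PySem.Str.strip v)) (pvClean rest) := rfl
          rw [hstep, hadd, ih, hupd, hadd]

theorem mem_pvDedup_of_mem {ts : List String} {prev : Option String} {x : String}
    (h : x ∈ pvDedup ts prev) : x ∈ ts := by
  induction ts generalizing prev with
  | nil => simp [pvDedup] at h
  | cons t rest ih =>
      simp only [pvDedup] at h
      split_ifs at h with hp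
      · rcases List.mem_cons.mp h with h | h
        · simp [h]
        · exact List.mem_cons_of_mem _ (ih h)
      · exact List.mem_cons_of_mem _ (ih h)

theorem mem_pvDedup {ts : List String} {prev : Option String} {x : String}
    (h : x ∈ ts) : x ∈ pvDedup ts prev ∨ prev = some x := by
  induction ts generalizing prev with
  | nil => simp at h
  | cons t rest ih =>
      simp only [pvDedup]
      rcases List.mem_cons.mp h with rfl | h
      · split_ifs with hp
        · exact Or.inl List.mem_cons_self
        · right; push_neg at hp; exact hp.symm
      · split_ifs with hp
        · rcases ih h with h' | h'
          · exact Or.inl (List.mem_cons_of_mem _ h')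
          · rw [Option.some_inj] at h'
            exact Or.inl (h' ▸ List.mem_cons_self)
        · exact ih h

theorem pvDedup_pairwise_lt {ts : List String} {prev : Option String}
    (hs : ts.Pairwise (· ≤ ·))
    (hb : ∀ p, prev = some p → ∀ x ∈ ts, p ≤ x) :
    (pvDedup ts prev).Pairwise (· < ·) ∧
      (∀ p, prev = some p → ∀ x ∈ pvDedup ts prev, p < x) := by
  induction ts generalizing prev with
  | nil => simp [pvDedup]
  | cons t rest ih =>
      rcases List.pairwise_cons.mp hs with ⟨ht, hrest⟩
      simp only [pvDedup]
      split_ifs with hp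
      · have hb' : ∀ p, some t = some p → ∀ x ∈ rest, p ≤ x := by
          rintro p hpq x hx
          exact (Option.some_inj.mp hpq) ▸ ht x hx
        obtain ⟨hpw, hgt⟩ := ih hrest hb'
        constructor
        · exact List.pairwise_cons.mpr ⟨fun x hx => hgt t rfl x hx, hpw⟩
        · rintro p rfl x hx
          rcases List.mem_cons.mp hx with hxe | hx
          · have hle : p ≤ x := hb p rfl x (by rw [hxe]; exact List.mem_cons_self)
            exact lt_of_le_of_ne hle fun he => hp (congrArg some ((he.trans hxe).symm))
          · exact lt_of_le_of_lt (hb p rfl t List.mem_cons_self) (hgt t rfl x hx)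
      · push_neg at hp
        have hb' : ∀ p, prev = some p → ∀ x ∈ rest, p ≤ x := by
          rintro p rfl x hx
          exact Option.some_inj.mp hp.symm ▸ ht x hx
        exact ih hrest hb'

theorem pvDedup_sorted_eq (xs : List String) :
    PySem.List.sorted (PySem.Set.ofList xs) (fun x => x) false
      = pvDedup (PySem.List.sorted xs (fun x => x) false) none := by
  obtain ⟨hpw, -⟩ := pvDedup_pairwise_lt
    (ts := PySem.List.sorted xs (fun x => x) false) (prev := none)
    (by simpa using PySem.List.sorted_pairwise (xs := xs) (key := fun x => x))
    (by rintro p ⟨⟩)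
  apply PySem.List.sorted_eq_of_perm_of_pairwise_lt
  · have hnd : (pvDedup (PySem.List.sorted xs (fun x => x) false) none).Nodup :=
      hpw.imp (fun h => ne_of_lt h)
    have hnd2 : (PySem.Set.ofList xs).Nodup := PySem.Set.nodup_ofList xs
    refine (List.perm_ext_iff_of_nodup hnd hnd2).mpr ?_
    intro a
    constructor
    · intro ha
      have := mem_pvDedup_of_mem ha
      rw [PySem.List.mem_sorted] at this
      exact (PySem.Set.mem_ofList _ _).mpr this
    · intro ha
      have hm : a ∈ PySem.List.sorted xs (fun x => x) false :=
        (PySem.List.mem_sorted _ _ _ _).mpr ((PySem.Set.mem_ofList _ _).mp ha)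
      rcases mem_pvDedup (prev := none) hm with h | h
      · exact h
      · exact absurd h (by simp)
  · simpa using hpw

-- ===== VERDICT (by name: the statement is the Claim_ definition above) =====
theorem join_distinct_py_spec : Claim_equal_join_distinct_py := by
  intro values _
  show PySem.Str.join ";"
      (PySem.List.sorted (List.foldl pvStepA ([], PySem.Set.empty) values).1 (fun x => x) false)
    = PySem.Str.join ";"
      (pyDedupLoop (PySem.List.sorted (List.foldl pvStepB [] values) (fun x => x) false) none [])
  rw [show (([], PySem.Set.empty) : List String × PySem.Set String)
        = (PySem.Set.empty, PySem.Set.empty) from rfl,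
      foldA_eq, foldB_eq, pyDedupLoop_eq]
  simp only [List.nil_append]
  congr 1
  have h0 : PySem.Set.update (PySem.Set.empty (α := String)) (pvClean values)
      = PySem.Set.ofList (pvClean values) := rfl
  rw [h0, pvDedup_sorted_eq]
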